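-- pv_equiv track=rewrite | github.com/aboutexo04/simple-commute-weather | src/commute_weather/data_sources/kma_api.py | _normalize_header_tokens
-- ===== SOURCE A (Python) =====
-- from typing import List, Mapping, Optional, Sequence
--
-- _HEADER_ALIASES: Mapping[str, str] = {
--     "yymmddhhmi": "tm",
--     "tm": "tm",
--     "stn": "stn",
--     "ta": "ta",
--     "hm": "hm",
--     "rh": "hm",
--     "reh": "hm",
--     "ws": "ws",
--     "rn": "rn",
-- }
--
-- def _normalize_header_tokens(raw_tokens: Sequence[str]) -> list[str]:
--     counts: dict[str, int] = {}
--     normalized: list[str] = []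
--
--     for token in raw_tokens:
--         key = _HEADER_ALIASES.get(token.lower(), token.lower())
--         if key in counts:
--             suffix = counts[key]
--             normalized.append(f"{key}_{suffix}")
--             counts[key] = suffix + 1
--         else:
--             normalized.append(key)
--             counts[key] = 1
--
--     return normalized
-- ===== SOURCE B (Python) =====
-- from typing import Mapping, Sequence
--
-- _HEADER_ALIASES: Mapping[str, str] = {
--     "yymmddhhmi": "tm",
--     "tm": "tm",
--     "stn": "stn",
--     "ta": "ta",
--     "hm": "hm",
--     "rh": "hm",
--     "reh": "hm",
--     "ws": "ws",
--     "rn": "rn",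
-- }
--
--
-- def _normalize_header_tokens(raw_tokens: Sequence[str]) -> list[str]:
--     # Two-pass grouping form: map every token to its normalized key, group the
--     # positions of each key, then scatter "key" / "key_j" back by position.
--     keys = [_HEADER_ALIASES.get(t.lower(), t.lower()) for t in raw_tokens]
--     groups: dict[str, list[int]] = {}
--     for i, key in enumerate(keys):
--         groups.setdefault(key, []).append(i)
--     rendered: dict[int, str] = {}
--     for key, positions in groups.items():
--         for j, pos in enumerate(positions):
--             rendered[pos] = key if j == 0 else f"{key}_{j}"
--     return [rendered[i] for i in range(len(keys))]
-- ===== Notes on version B (the rewrite author's own statement) =====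
-- stated objective: alternative
-- what changed: B replaces A's single streaming pass with a mutable running-count dict by a grouping decomposition: it maps every token to its normalized key, builds a dict from key to the ordered list of positions where it occurs, then scatters 'key' / 'key_j' back to those positions and reads the result out in index order.
import Mathlib
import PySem

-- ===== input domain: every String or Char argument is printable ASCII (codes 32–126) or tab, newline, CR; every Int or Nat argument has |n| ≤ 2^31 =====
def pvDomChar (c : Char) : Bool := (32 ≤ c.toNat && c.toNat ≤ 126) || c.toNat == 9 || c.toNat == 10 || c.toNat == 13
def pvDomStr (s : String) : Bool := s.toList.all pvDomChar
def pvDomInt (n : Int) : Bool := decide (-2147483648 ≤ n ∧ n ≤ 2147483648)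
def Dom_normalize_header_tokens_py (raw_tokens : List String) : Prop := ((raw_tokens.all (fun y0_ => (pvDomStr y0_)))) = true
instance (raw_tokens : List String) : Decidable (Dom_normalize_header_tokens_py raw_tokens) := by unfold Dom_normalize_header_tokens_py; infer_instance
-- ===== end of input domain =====

-- B replaces A's streaming counter dict by a grouping pass (key -> ordered positions) followed by
-- a scatter of the rendered names back to their positions; objective: alternative.


-- ===== PORT A =====
-- shared module constant _HEADER_ALIASES
def pvAliases : PySem.Dict String String := PySem.Dict.ofList
  [("yymmddhhmi", "tm"), ("tm", "tm"), ("stn", "stn"), ("ta", "ta"), ("hm", "hm"),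
   ("rh", "hm"), ("reh", "hm"), ("ws", "ws"), ("rn", "rn")]

-- _HEADER_ALIASES.get(token.lower(), token.lower())
def pvKeyOf (t : String) : String := PySem.Dict.getD pvAliases (PySem.Str.lower t) (PySem.Str.lower t)

def normalize_header_tokens_py (raw_tokens : List String) : List String :=
  (raw_tokens.foldl
    (fun (st : PySem.Dict String Int × List String) token =>
      let key := pvKeyOf token
      -- 'if key in counts' as a match on the lookup (contains ↔ get?.isSome)
      match st.1.get? key with
      | some suffix => (st.1.insert key (suffix + 1), st.2 ++ [key ++ "_" ++ PySem.Int.toStr suffix])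
      | none => (st.1.insert key 1, st.2 ++ [key]))
    (PySem.Dict.empty, [])).2

-- ===== PORT B =====
def normalize_header_tokens_py_alt (raw_tokens : List String) : List String :=
  let keys := raw_tokens.map pvKeyOf
  let groups : PySem.Dict String (List Int) :=
    (PySem.List.enumerate keys).foldl
      (fun g ik => g.modify ik.2 [] (fun l => l ++ [ik.1])) PySem.Dict.empty
  let rendered : PySem.Dict Int String :=
    groups.items.foldl
      (fun r kp =>
        (PySem.List.enumerate kp.2).foldl
          (fun r jp =>
            r.insert jp.2 (if jp.1 = 0 then kp.1 else kp.1 ++ "_" ++ PySem.Int.toStr jp.1)) r)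
      PySem.Dict.empty
  -- rendered[i]: every 0 ≤ i < len(keys) is a key of rendered (proved below), so the
  -- default lookup is exact here
  (PySem.List.pyRange 0 (keys.length : Int) 1).map (fun i => rendered.getD i "")

-- ===== PRECONDITION & SPEC =====
def Spec_normalize_header_tokens_py (raw_tokens : List String) (out : List String) : Prop := out = normalize_header_tokens_py_alt raw_tokens
instance (raw_tokens : List String) (out : List String) : Decidable (Spec_normalize_header_tokens_py raw_tokens out) := by unfold Spec_normalize_header_tokens_py; infer_instance

-- ===== CLAIM (what is proved, stated in full; the proofs are below) =====
def Claim_equal_normalize_header_tokens_py : Prop := ∀ (raw_tokens : List String), Dom_normalize_header_tokens_py raw_tokens → Spec_normalize_header_tokens_py raw_tokens (normalize_header_tokens_py raw_tokens)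

-- ===== LEMMAS AND PROOFS =====

-- common characterisation: output for the remaining keys, given the already-seen key prefix
def pvSpec : List String → List String → List String
  | _, [] => []
  | pfx, k :: rest =>
      (if pfx.count k = 0 then k else k ++ "_" ++ PySem.Int.toStr ((pfx.count k : Nat) : Int))
        :: pvSpec (pfx ++ [k]) rest

lemma pv_count_append_self (pfx : List String) (k : String) :
    (pfx ++ [k]).count k = pfx.count k + 1 := by
  simp [List.count_append]

lemma pv_count_append_ne (pfx : List String) (k k' : String) (h : k' ≠ k) :
    (pfx ++ [k]).count k' = pfx.count k' := by
  simp [List.count_append, List.count_singleton]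
  exact fun e => h e.symm

-- A's loop equals pvSpec, with the counts-dict invariant
lemma pvA_loop :
    ∀ (ts pfx : List String) (counts : PySem.Dict String Int) (acc : List String),
    (∀ k, counts.get? k = if pfx.count k = 0 then none else some ((pfx.count k : Nat) : Int)) →
    (ts.foldl
      (fun (st : PySem.Dict String Int × List String) token =>
        let key := pvKeyOf token
        match st.1.get? key with
        | some suffix => (st.1.insert key (suffix + 1), st.2 ++ [key ++ "_" ++ PySem.Int.toStr suffix])
        | none => (st.1.insert key 1, st.2 ++ [key]))
      (counts, acc)).2
    = acc ++ pvSpec pfx (ts.map pvKeyOf) := by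
  intro ts
  induction ts with
  | nil => intro pfx counts acc hinv; simp [pvSpec]
  | cons t ts ih =>
    intro pfx counts acc hinv
    have hk := hinv (pvKeyOf t)
    by_cases hc : pfx.count (pvKeyOf t) = 0
    · rw [if_pos hc] at hk
      simp only [List.foldl_cons, List.map_cons, hk]
      rw [ih (pfx ++ [pvKeyOf t]) _ _ ?_]
      · simp [pvSpec, hc]
      · intro k'
        by_cases hkk : k' = pvKeyOf t
        · rw [hkk, PySem.Dict.get?_insert_self, pv_count_append_self, hc]
          simp
        · rw [PySem.Dict.get?_insert_of_ne _ _ hkk, pv_count_append_ne _ _ _ hkk]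
          exact hinv k'
    · rw [if_neg hc] at hk
      simp only [List.foldl_cons, List.map_cons, hk]
      rw [ih (pfx ++ [pvKeyOf t]) _ _ ?_]
      · simp [pvSpec, hc]
      · intro k'
        by_cases hkk : k' = pvKeyOf t
        · rw [hkk, PySem.Dict.get?_insert_self, pv_count_append_self]
          have : pfx.count (pvKeyOf t) + 1 ≠ 0 := by omega
          rw [if_neg this]
          push_cast
          ring_nf
        · rw [PySem.Dict.get?_insert_of_ne _ _ hkk, pv_count_append_ne _ _ _ hkk]
          exact hinv k'

-- ---------- B-side helpers (proof-side names for the port's intermediate values) ----------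

def pvRen (k : String) (j : Int) : String := if j = 0 then k else k ++ "_" ++ PySem.Int.toStr j

-- the positions (as Int, in order) at which key k occurs in keys
def pvPoss (keys : List String) (k : String) : List Int :=
  ((PySem.List.enumerate keys).filter (fun ik => ik.2 == k)).map (fun ik => ik.1)

def pvGroupsOf (keys : List String) : PySem.Dict String (List Int) :=
  (PySem.List.enumerate keys).foldl
    (fun g ik => g.modify ik.2 [] (fun l => l ++ [ik.1])) PySem.Dict.empty

def pvRenderedOf (keys : List String) : PySem.Dict Int String :=
  (pvGroupsOf keys).items.foldl
    (fun r kp =>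
      (PySem.List.enumerate kp.2).foldl
        (fun r jp =>
          r.insert jp.2 (if jp.1 = 0 then kp.1 else kp.1 ++ "_" ++ PySem.Int.toStr jp.1)) r)
    PySem.Dict.empty

def pvTarget (keys : List String) (i : Nat) : String :=
  pvRen (keys.getD i "") (((keys.take i).count (keys.getD i "") : Nat) : Int)

lemma pvAlt_eq (raw_tokens : List String) :
    normalize_header_tokens_py_alt raw_tokens =
      (PySem.List.pyRange 0 (((raw_tokens.map pvKeyOf).length : Nat) : Int)).map
        (fun i => (pvRenderedOf (raw_tokens.map pvKeyOf)).getD i "") := rfl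

-- enumerate indexed
lemma pv_enum_getElem? {α : Type} :
    ∀ (l : List α) (s : Int) (j : Nat),
      (PySem.List.enumerate l s)[j]? = (l[j]?).map (fun x => (s + (j : Int), x)) := by
  intro l
  induction l with
  | nil => intro s j; simp [PySem.List.enumerate_nil]
  | cons x xs ih =>
    intro s j
    rw [PySem.List.enumerate_cons]
    cases j with
    | zero => simp
    | succ j' =>
      rw [List.getElem?_cons_succ, List.getElem?_cons_succ, ih (s + 1) j']
      have : s + 1 + (j' : Int) = s + ((j' + 1 : Nat) : Int) := by push_cast; ring
      rw [this]

-- groups.getD k [] is exactly the position list of k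
lemma pvGroups_getD (keys : List String) (k : String) :
    (pvGroupsOf keys).getD k [] = pvPoss keys k := by
  unfold pvGroupsOf
  have hfold : (PySem.List.enumerate keys).foldl
        (fun g ik => g.modify ik.2 [] (fun l => l ++ [ik.1])) PySem.Dict.empty
      = (((PySem.List.enumerate keys).map Prod.swap).foldl
          (fun g p => g.modify p.1 [] (fun l => l ++ [p.2])) PySem.Dict.empty) := by
    rw [List.foldl_map]
    rfl
  rw [hfold, PySem.Dict.getD_foldl_modify_append]
  simp [pvPoss, List.filter_map, List.map_map, Function.comp_def, Prod.swap]

lemma pvGroups_keys (keys : List String) :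
    (pvGroupsOf keys).keys = PySem.Set.ofList keys := by
  unfold pvGroupsOf
  rw [PySem.Dict.keys_foldl_modify_key (PySem.List.enumerate keys) (fun ik => ik.2) []
        (fun _ ik => fun l => l ++ [ik.1]) PySem.Dict.empty]
  rw [PySem.List.map_snd_enumerate]
  simp [PySem.Set.update_nil_left]

lemma pvGroups_keys_nodup (keys : List String) : (pvGroupsOf keys).keys.Nodup := by
  unfold pvGroupsOf
  exact PySem.Dict.nodup_keys_foldl_modify_key _ _ _ _ _ (by simp)

lemma pvGroups_items (keys : List String) :
    (pvGroupsOf keys).items = (PySem.Set.ofList keys).map (fun k => (k, pvPoss keys k)) := by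
  rw [PySem.Dict.items_eq_map_keys (pvGroupsOf keys) (pvGroups_keys_nodup keys) []]
  rw [pvGroups_keys]
  exact List.map_congr_left (fun k _ => by rw [pvGroups_getD])

-- membership in a position list forces the key at that position
lemma pvPoss_mem_imp (keys : List String) (k : String) (p : Int) (hp : p ∈ pvPoss keys k) :
    ∃ i : Nat, p = (i : Int) ∧ keys[i]? = some k := by
  unfold pvPoss at hp
  obtain ⟨ik, hmem, hval⟩ := List.mem_map.mp hp
  rw [List.mem_filter] at hmem
  obtain ⟨hmem, hfil⟩ := hmem
  obtain ⟨j, hj⟩ := List.mem_iff_getElem?.mp hmem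
  rw [pv_enum_getElem?] at hj
  cases hkj : keys[j]? with
  | none => rw [hkj] at hj; simp at hj
  | some y =>
    rw [hkj] at hj
    simp only [Option.map_some, Option.some.injEq] at hj
    refine ⟨j, ?_, ?_⟩
    · rw [← hval, ← hj]; simp
    · rw [hkj]
      have : ik.2 = k := by simpa using hfil
      rw [← this, ← hj]

-- conversely, the occurrence of k at position i sits at index (prefix count) in the list
lemma pvPoss_mem_at :
    ∀ (keys : List String) (s : Nat) (k : String) (i : Nat), keys[i]? = some k →
      (((PySem.List.enumerate keys (s : Int)).filter (fun ik => ik.2 == k)).map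
        (fun ik => ik.1))[(keys.take i).count k]? = some ((s + i : Nat) : Int) := by
  intro keys
  induction keys with
  | nil => intro s k i h; simp at h
  | cons x xs ih =>
    intro s k i h
    rw [PySem.List.enumerate_cons]
    cases i with
    | zero =>
      rw [List.getElem?_cons_zero, Option.some.injEq] at h
      rw [List.filter_cons_of_pos (by simp [h]), List.map_cons]
      simp
    | succ i' =>
      rw [List.getElem?_cons_succ] at h
      by_cases hx : x = k
      · subst hx
        rw [List.filter_cons_of_pos (by simp), List.map_cons]
        rw [List.take_succ_cons, List.count_cons]
        simp only [BEq.rfl, if_true]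
        rw [List.getElem?_cons_succ,
            show (s : Int) + 1 = ((s + 1 : Nat) : Int) by push_cast; ring,
            ih (s + 1) x i' h]
        congr 1
        omega
      · rw [List.filter_cons_of_neg (by simp [hx])]
        rw [List.take_succ_cons, List.count_cons]
        have h0 : (x == k) = false := by simp [hx]
        rw [h0]
        simp only [Bool.false_eq_true, if_false, add_zero]
        rw [show (s : Int) + 1 = ((s + 1 : Nat) : Int) by push_cast; ring,
            ih (s + 1) k i' h]
        congr 1
        omega

-- the flattened write list of the scatter loop
def pvWrites (keys : List String) : List (Int × String) :=
  (PySem.Set.ofList keys).flatMap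
    (fun k => (PySem.List.enumerate (pvPoss keys k)).map (fun jp => (jp.2, pvRen k jp.1)))

lemma pvWrites_map_fst (keys : List String) :
    (pvWrites keys).map (fun w => w.1) = (PySem.Set.ofList keys).flatMap (pvPoss keys) := by
  unfold pvWrites
  rw [List.map_flatMap]
  congr 1
  funext k
  rw [List.map_map]
  exact PySem.List.map_snd_enumerate _ _

lemma pvWrites_fst_nodup (keys : List String) :
    ((pvWrites keys).map (fun w => w.1)).Nodup := by
  rw [pvWrites_map_fst]
  rw [List.nodup_flatMap]
  constructor
  · intro k _
    unfold pvPoss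
    have hsub : (((PySem.List.enumerate keys).filter (fun ik => ik.2 == k)).map (fun ik => ik.1)).Sublist
        ((PySem.List.enumerate keys).map (fun ik => ik.1)) :=
      List.Sublist.map _ List.filter_sublist
    refine hsub.nodup ?_
    rw [PySem.List.map_fst_enumerate]
    exact PySem.List.nodup_pyRange_one _ _
  · refine List.Pairwise.imp ?_ (PySem.Set.nodup_ofList keys)
    intro a b hab p hpa hpb
    obtain ⟨i, hpi, hki⟩ := pvPoss_mem_imp keys a p hpa
    obtain ⟨i', hpi', hki'⟩ := pvPoss_mem_imp keys b p hpb
    have hii : i = i' := by omega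
    have hsome : some a = some b := by rw [← hki, hii, hki']
    exact hab (Option.some_inj.mp hsome)

lemma pvRendered_items (keys : List String) :
    (pvRenderedOf keys).items = pvWrites keys := by
  unfold pvRenderedOf
  have hinner : ∀ (kp : String × List Int) (r : PySem.Dict Int String),
      (PySem.List.enumerate kp.2).foldl
        (fun r jp =>
          r.insert jp.2 (if jp.1 = 0 then kp.1 else kp.1 ++ "_" ++ PySem.Int.toStr jp.1)) r
      = ((PySem.List.enumerate kp.2).map (fun jp => (jp.2, pvRen kp.1 jp.1))).foldl
          (fun r w => r.insert w.1 w.2) r := by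
    intro kp r
    rw [List.foldl_map]
    rfl
  simp only [hinner]
  rw [← List.foldl_flatMap]
  have hflat : (pvGroupsOf keys).items.flatMap
      (fun kp => (PySem.List.enumerate kp.2).map (fun jp => (jp.2, pvRen kp.1 jp.1)))
      = pvWrites keys := by
    rw [pvGroups_items, List.flatMap_map]
    rfl
  rw [hflat]
  rw [PySem.Dict.items_foldl_insert_fresh (pvWrites keys) (fun w => w.1) (fun w => w.2)
        PySem.Dict.empty (fun a _ => by simp) (pvWrites_fst_nodup keys)]
  simp [show PySem.Dict.empty.items = ([] : List (Int × String)) from rfl]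

lemma pvRendered_getD (keys : List String) (i : Nat) (hi : i < keys.length) :
    (pvRenderedOf keys).getD (i : Int) "" = pvTarget keys i := by
  have hk0 : keys[i]? = some keys[i] := List.getElem?_eq_getElem hi
  have hposs : (pvPoss keys keys[i])[(keys.take i).count keys[i]]? = some (i : Int) := by
    have h := pvPoss_mem_at keys 0 keys[i] i hk0
    simpa [pvPoss] using h
  have henum : ((((keys.take i).count keys[i] : Nat) : Int), (i : Int)) ∈
      PySem.List.enumerate (pvPoss keys keys[i]) := by
    refine List.mem_iff_getElem?.mpr ⟨(keys.take i).count keys[i], ?_⟩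
    rw [pv_enum_getElem?, hposs]
    simp
  have hgd : keys.getD i "" = keys[i] := List.getD_eq_getElem _ _ hi
  have hmem : ((i : Int), pvTarget keys i) ∈ (pvRenderedOf keys).items := by
    rw [pvRendered_items]
    unfold pvWrites
    refine List.mem_flatMap.mpr ⟨keys[i], (by simp), ?_⟩
    refine List.mem_map.mpr ⟨_, henum, ?_⟩
    unfold pvTarget
    rw [hgd]
  have hnodup : (pvRenderedOf keys).keys.Nodup := by
    have hk : (pvRenderedOf keys).keys = (pvWrites keys).map (fun w => w.1) := by
      unfold PySem.Dict.keys
      rw [pvRendered_items]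
    rw [hk]
    exact pvWrites_fst_nodup keys
  exact PySem.Dict.getD_of_mem_items _ hmem hnodup ""

lemma pvSpec_eq_map :
    ∀ (rest pfx : List String),
      pvSpec pfx rest = (List.range rest.length).map (fun i =>
        pvRen (rest.getD i "") (((pfx ++ rest.take i).count (rest.getD i "") : Nat) : Int)) := by
  intro rest
  induction rest with
  | nil => intro pfx; simp [pvSpec]
  | cons k rest ih =>
    intro pfx
    rw [List.length_cons, List.range_succ_eq_map, List.map_cons, List.map_map]
    show pvSpec pfx (k :: rest) = _ :: _
    simp only [pvSpec]
    congr 1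
    · simp [pvRen]
    · rw [ih (pfx ++ [k])]
      apply List.map_congr_left
      intro i hi
      simp only [Function.comp_def, Nat.succ_eq_add_one, List.getD_cons_succ,
        List.take_succ_cons]
      simp [List.append_assoc]

lemma pvB_eq_spec (raw_tokens : List String) :
    normalize_header_tokens_py_alt raw_tokens = pvSpec [] (raw_tokens.map pvKeyOf) := by
  rw [pvAlt_eq raw_tokens, pvSpec_eq_map]
  rw [PySem.List.pyRange_one, List.map_map]
  simp only [sub_zero, Int.toNat_natCast]
  apply List.map_congr_left
  intro i hi
  rw [List.mem_range] at hi
  simp only [Function.comp_def, zero_add]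
  rw [pvRendered_getD _ i hi]
  simp [pvTarget]

-- ===== VERDICT (by name: the statement is the Claim_ definition above) =====
theorem normalize_header_tokens_py_spec : Claim_equal_normalize_header_tokens_py := by
  intro raw_tokens _
  unfold Spec_normalize_header_tokens_py
  rw [pvB_eq_spec]
  unfold normalize_header_tokens_py
  rw [pvA_loop raw_tokens [] PySem.Dict.empty [] (fun k => by simp)]
  simp
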